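-- pv_equiv track=rewrite | github.com/Insiro/algorithm-study | backjoon/bj22846.py | get_divigers
-- ===== SOURCE A (Python) =====
-- from typing import List, Any, Dict, Tuple
--
-- def get_divigers(target: int, max_num: int) -> List[int]:
--     divigers: List[int] = []
--     i = 1
--     while i <= max_num and i * i <= target:
--         if target % i == 0:
--             divigers.append(i)
--             if (target/i <= max_num) and (not i * i == target):
--                 divigers.append(int(target/i))
--         i = i+1
--     divigers.sort()
--     divigers.reverse()
--     return divigers
-- ===== SOURCE B (Python) =====
-- def get_divigers(target: int, max_num: int) -> list:
--     # Different algorithm: prime-factorise target by trial division with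
--     # reduction, then generate every divisor as a product of prime powers,
--     # keep those <= max_num, and sort descending.  No divisor/cofactor
--     # pairing and no float division.  Non-positive target has no divisors.
--     if target <= 0:
--         return []
--     factors = []
--     n = target
--     p = 2
--     while p * p <= n:
--         if n % p == 0:
--             e = 0
--             while n % p == 0:
--                 n //= p
--                 e += 1
--             factors.append((p, e))
--         p += 1
--     if n > 1:
--         factors.append((n, 1))
--     divs = {1}
--     for p, e in factors:
--         divs = {d * p ** k for d in divs for k in range(e + 1)}
--     return sorted((d for d in divs if d <= max_num), reverse=True)
-- ===== Notes on version B (the rewrite author's own statement) =====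
-- stated objective: alternative
-- what changed: B prime-factorises target by trial division with reduction and generates every divisor as a product of prime powers (filtered by max_num and sorted descending), instead of A's sqrt-bounded collection of divisor/float-cofactor pairs followed by sort+reverse.
import Mathlib
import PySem

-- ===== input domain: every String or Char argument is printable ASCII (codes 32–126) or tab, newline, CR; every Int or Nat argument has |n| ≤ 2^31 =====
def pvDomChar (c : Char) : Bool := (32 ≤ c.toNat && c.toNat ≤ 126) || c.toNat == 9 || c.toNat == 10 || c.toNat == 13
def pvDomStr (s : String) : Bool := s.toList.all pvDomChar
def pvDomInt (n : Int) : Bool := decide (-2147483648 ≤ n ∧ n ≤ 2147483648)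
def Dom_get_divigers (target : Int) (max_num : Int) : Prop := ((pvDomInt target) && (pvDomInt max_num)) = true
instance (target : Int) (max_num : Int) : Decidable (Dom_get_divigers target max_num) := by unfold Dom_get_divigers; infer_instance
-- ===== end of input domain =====

-- B prime-factorises target and generates all divisors from the prime powers, instead of
-- A's sqrt-bounded divisor/cofactor pairing plus sort+reverse; equivalence is proved for all inputs.

-- ===== PORT A =====
-- A's while loop; `int(target/i)` is ported as floor division, which is exact here:
-- it is only evaluated under `target % i == 0`, where target/i is an integer whose
-- float image is exact on the stated |int| ≤ 2^31 domain.
def aloopA (t m : Int) (i : Int) (acc : List Int) : List Int :=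
  if _h : i ≤ m ∧ i * i ≤ t then
    aloopA t m (i + 1)
      (if PySem.Int.mod t i == 0 then
        acc ++ [i] ++
          (if PySem.Int.floordiv t i ≤ m ∧ ¬(i * i = t) then [PySem.Int.floordiv t i] else [])
      else acc)
  else acc
termination_by (m + 1 - i).toNat
decreasing_by omega

def get_divigers (target : Int) (max_num : Int) : List Int :=
  (PySem.List.sorted (aloopA target max_num 1 []) (fun x => x) false).reverse

-- ===== PORT B =====
-- inner `while n % p == 0: n //= p; e += 1`; `fuel` is a totality guard only
-- (n shrinks by a factor ≥ 2 each pass, so fuel = n.toNat is always enough)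
def pvTrial (fuel : Nat) (p n e : Int) : Int × Int :=
  match fuel with
  | 0 => (n, e)
  | fuel + 1 =>
      if PySem.Int.mod n p == 0 then pvTrial fuel p (PySem.Int.floordiv n p) (e + 1)
      else (n, e)

-- outer `while p * p <= n`; `fuel` is a totality guard only (p grows every pass)
def pvFactor (fuel : Nat) (n p : Int) (acc : List (Int × Int)) : List (Int × Int) × Int :=
  match fuel with
  | 0 => (acc, n)
  | fuel + 1 =>
      if p * p ≤ n then
        if PySem.Int.mod n p == 0 then
          pvFactor fuel (pvTrial n.toNat p n 0).1 (p + 1) (acc ++ [(p, (pvTrial n.toNat p n 0).2)])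
        else pvFactor fuel n (p + 1) acc
      else (acc, n)

-- `{d * p ** k for d in divs for k in range(e + 1)}`; `p ** k` is ported as
-- `p ^ k.toNat`, exact since every k drawn from range(e+1) is nonnegative
def pvStep (divs : List Int) (pe : Int × Int) : List Int :=
  PySem.Set.ofList (divs.flatMap
    (fun d => (PySem.List.pyRange 0 (pe.2 + 1) 1).map (fun k => d * pe.1 ^ k.toNat)))

def get_divigers_alt (target : Int) (max_num : Int) : List Int :=
  if target ≤ 0 then []
  else
    let fr := pvFactor (target.toNat + 1) target 2 []
    let factors := fr.1 ++ (if 1 < fr.2 then [(fr.2, 1)] else [])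
    let divs := factors.foldl pvStep (PySem.Set.ofList [1])
    PySem.List.sorted (divs.filter (fun d => decide (d ≤ max_num))) (fun x => x) true

-- ===== PRECONDITION & SPEC =====
def Spec_get_divigers (target : Int) (max_num : Int) (out : List Int) : Prop := out = get_divigers_alt target max_num
instance (target : Int) (max_num : Int) (out : List Int) : Decidable (Spec_get_divigers target max_num out) := by unfold Spec_get_divigers; infer_instance

-- ===== CLAIM (what is proved, stated in full; the proofs are below) =====
def Claim_equal_get_divigers : Prop := ∀ (target : Int) (max_num : Int), Dom_get_divigers target max_num → Spec_get_divigers target max_num (get_divigers target max_num)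

-- ===== LEMMAS AND PROOFS =====

-- the per-iteration contribution of A's loop body
def stepA (t m k : Int) : List Int :=
  if PySem.Int.mod t k == 0 then
    [k] ++ (if PySem.Int.floordiv t k ≤ m ∧ ¬(k * k = t) then [PySem.Int.floordiv t k] else [])
  else []

def pSmall (t k : Int) : Bool := PySem.Int.mod t k == 0
def pqA (t m k : Int) : Bool :=
  (PySem.Int.mod t k == 0) && decide (PySem.Int.floordiv t k ≤ m ∧ ¬(k * k = t))

-- A's loop only appends on the right
lemma aloopA_pre (t m : Int) :
    ∀ n i acc pre, (m + 1 - i).toNat ≤ n →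
      aloopA t m i (pre ++ acc) = pre ++ aloopA t m i acc := by
  intro n
  induction n with
  | zero =>
      intro i acc pre h
      conv_lhs => rw [aloopA]
      conv_rhs => rw [aloopA]
      rw [dif_neg (fun hc => absurd hc.1 (by omega : ¬ i ≤ m)),
        dif_neg (fun hc => absurd hc.1 (by omega : ¬ i ≤ m))]
  | succ n ih =>
      intro i acc pre h
      conv_lhs => rw [aloopA]
      conv_rhs => rw [aloopA]
      by_cases hc : i ≤ m ∧ i * i ≤ t
      · rw [dif_pos hc, dif_pos hc]
        by_cases hp : PySem.Int.mod t i == 0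
        · simp only [hp, if_true, List.append_assoc]
          exact ih (i + 1) _ pre (by omega)
        · simp only [hp]
          exact ih (i + 1) _ pre (by omega)
      · rw [dif_neg hc, dif_neg hc]

lemma aloopA_acc (t m i : Int) (acc : List Int) :
    aloopA t m i acc = acc ++ aloopA t m i [] := by
  simpa using aloopA_pre t m (m + 1 - i).toNat i [] acc le_rfl

-- closed form of A's loop over the traversed range
lemma aloopA_spec (t m : Int) :
    ∀ n i, (m + 1 - i).toNat ≤ n →
      ∃ j, i ≤ j ∧ ¬(j ≤ m ∧ j * j ≤ t) ∧ (∀ k, i ≤ k → k < j → k ≤ m ∧ k * k ≤ t) ∧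
        aloopA t m i [] = (PySem.List.pyRange i j).flatMap (stepA t m) := by
  intro n
  induction n with
  | zero =>
      intro i h
      refine ⟨i, le_rfl, fun hc => absurd hc.1 (by omega), fun k h1 h2 => absurd h1 (by omega), ?_⟩
      rw [aloopA, dif_neg (fun hc => absurd hc.1 (by omega)),
        PySem.List.pyRange_one_eq_nil le_rfl]
      rfl
  | succ n ih =>
      intro i h
      by_cases hc : i ≤ m ∧ i * i ≤ t
      · obtain ⟨j, hij, hex, hint, heq⟩ := ih (i + 1) (by omega)
        refine ⟨j, by omega, hex, ?_, ?_⟩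
        · intro k h1 h2
          rcases eq_or_lt_of_le h1 with h1 | h1
          · exact h1 ▸ hc
          · exact hint k (by omega) h2
        · rw [aloopA, dif_pos hc, aloopA_acc,
            PySem.List.pyRange_one_cons (by omega : i < j), List.flatMap_cons, heq]
          by_cases hp : PySem.Int.mod t i == 0
          · simp [stepA, hp]
          · simp [stepA, hp]
      · refine ⟨i, le_rfl, hc, fun k h1 h2 => absurd h1 (by omega), ?_⟩
        rw [aloopA, dif_neg hc, PySem.List.pyRange_one_eq_nil le_rfl]
        rfl

-- the flattened A-loop output is a permutation of (small divisors) ++ (kept cofactors)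
lemma flatMap_stepA_perm (t m : Int) (R : List Int) :
    (R.flatMap (stepA t m)).Perm
      (R.filter (pSmall t) ++ (R.filter (pqA t m)).map (fun k => PySem.Int.floordiv t k)) := by
  induction R with
  | nil => simp
  | cons k R ih =>
      by_cases hp : PySem.Int.mod t k == 0
      · by_cases hq : PySem.Int.floordiv t k ≤ m ∧ ¬(k * k = t)
        · simp only [List.flatMap_cons, stepA, if_true, if_pos hq, List.filter_cons, pSmall,
            pqA, hp]
          simp only [hq]
          simp only [List.cons_append, List.nil_append]
          refine List.Perm.cons k ?_
          exact (ih.cons _).trans List.perm_middle.symm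
        · simp only [List.flatMap_cons, stepA, if_true, if_neg hq, List.filter_cons, pSmall,
            pqA, hp]
          simp only [hq, decide_false, Bool.and_false, List.append_nil]
          simpa using ih.cons k
      · simp only [List.flatMap_cons, stepA, List.filter_cons, pSmall, pqA, hp, Bool.false_and]
        exact ih

-- exact-division arithmetic (divisor positive, dividend positive)
lemma fdiv_mul (t k : Int) (hk : 1 ≤ k) (hd : k ∣ t) :
    PySem.Int.floordiv t k * k = t := by
  rw [PySem.Int.floordiv_eq_ediv_of_pos (by omega)]
  exact Int.ediv_mul_cancel hd

lemma fdiv_pos (t k : Int) (ht : 1 ≤ t) (hk : 1 ≤ k) (hd : k ∣ t) :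
    1 ≤ PySem.Int.floordiv t k := by
  have h := fdiv_mul t k hk hd
  nlinarith [h]

lemma fdiv_sq_gt (t k : Int) (ht : 1 ≤ t) (hk : 1 ≤ k) (hd : k ∣ t) (hlt : k * k < t) :
    t < PySem.Int.floordiv t k * PySem.Int.floordiv t k := by
  have h := fdiv_mul t k hk hd
  have he := fdiv_pos t k ht hk hd
  nlinarith [h, he]

lemma fdiv_anti (t k1 k2 : Int) (ht : 1 ≤ t) (h1 : 1 ≤ k1) (hd1 : k1 ∣ t) (hd2 : k2 ∣ t)
    (hlt : k1 < k2) : PySem.Int.floordiv t k2 < PySem.Int.floordiv t k1 := by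
  have ha := fdiv_mul t k1 h1 hd1
  have hb := fdiv_mul t k2 (by omega) hd2
  have hpa := fdiv_pos t k1 ht h1 hd1
  have hpb := fdiv_pos t k2 ht (by omega) hd2
  nlinarith [ha, hb, hpa, hpb]

lemma lt_of_sq_lt (x y t : Int) (hx : 1 ≤ x) (hy : 1 ≤ y) (h1 : x * x ≤ t) (h2 : t < y * y) :
    x < y := by nlinarith

-- two strictly descending integer lists with the same members are equal
lemma desc_ext (l1 : List Int) :
    ∀ l2 : List Int, l1.Pairwise (fun a b => b < a) → l2.Pairwise (fun a b => b < a) →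
      (∀ x, x ∈ l1 ↔ x ∈ l2) → l1 = l2 := by
  induction l1 with
  | nil =>
      intro l2 _ _ hm
      cases l2 with
      | nil => rfl
      | cons b l2 => exact absurd ((hm b).mpr (List.mem_cons_self ..)) (by simp)
  | cons a l1 ih =>
      intro l2 h1 h2 hm
      cases l2 with
      | nil => exact absurd ((hm a).mp (List.mem_cons_self ..)) (by simp)
      | cons b l2 =>
          have hab : a = b := by
            have ha := (hm a).mp (List.mem_cons_self ..)
            have hb := (hm b).mpr (List.mem_cons_self ..)
            rcases List.mem_cons.mp ha with h | h
            · exact h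
            · rcases List.mem_cons.mp hb with h' | h'
              · exact h'.symm
              · have c1 := List.rel_of_pairwise_cons h2 h
                have c2 := List.rel_of_pairwise_cons h1 h'
                omega
          subst hab
          have htail : l1 = l2 := by
            refine ih l2 h1.tail h2.tail (fun x => ?_)
            constructor
            · intro hx
              have hlt := List.rel_of_pairwise_cons h1 hx
              rcases List.mem_cons.mp ((hm x).mp (List.mem_cons_of_mem _ hx)) with h | h
              · omega
              · exact h
            · intro hx
              have hlt := List.rel_of_pairwise_cons h2 hx
              rcases List.mem_cons.mp ((hm x).mpr (List.mem_cons_of_mem _ hx)) with h | h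
              · omega
              · exact h
          rw [htail]

-- ============ B-side lemmas ============

def prodPE (L : List (Int × Int)) : Int := L.foldr (fun pe acc => pe.1 ^ pe.2.toNat * acc) 1

def GenI : List (Int × Int) → Int → Prop
  | [], x => x = 1
  | pe :: L, x => ∃ z k, GenI L z ∧ 0 ≤ k ∧ k ≤ pe.2 ∧ x = z * pe.1 ^ k.toNat

lemma prodPE_nil : prodPE [] = 1 := rfl

lemma prodPE_cons (pe : Int × Int) (L : List (Int × Int)) :
    prodPE (pe :: L) = pe.1 ^ pe.2.toNat * prodPE L := rfl

lemma prodPE_append (A B : List (Int × Int)) : prodPE (A ++ B) = prodPE A * prodPE B := by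
  induction A with
  | nil => simp [prodPE]
  | cons pe A ih => rw [List.cons_append, prodPE_cons, prodPE_cons, ih, mul_assoc]

lemma prodPE_pos (L : List (Int × Int)) (hL : ∀ pe ∈ L, 2 ≤ pe.1) : 1 ≤ prodPE L := by
  induction L with
  | nil => simp [prodPE]
  | cons pe L ih =>
      rw [prodPE_cons]
      have h1 : 1 ≤ pe.1 ^ pe.2.toNat := one_le_pow₀ (by have := hL pe (List.mem_cons_self ..); omega)
      have h2 := ih (fun q hq => hL q (List.mem_cons_of_mem _ hq))
      nlinarith

-- what the inner division loop computes: strips the exact power of p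
lemma pvTrial_spec : ∀ (fuel : Nat) (p n e : Int), n.toNat ≤ fuel → 2 ≤ p → 1 ≤ n →
    ∃ j : Nat, (pvTrial fuel p n e).2 = e + j ∧ n = p ^ j * (pvTrial fuel p n e).1 ∧
      ¬ (p ∣ (pvTrial fuel p n e).1) ∧ 1 ≤ (pvTrial fuel p n e).1 := by
  intro fuel
  induction fuel with
  | zero => intro p n e h hp hn; omega
  | succ fuel ih =>
      intro p n e h hp hn
      simp only [pvTrial]
      by_cases hc : PySem.Int.mod n p == 0
      · rw [if_pos hc]
        have hd : p ∣ n := (PySem.Int.mod_eq_zero_iff_dvd n p).mp (by simpa using hc)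
        have hmul : PySem.Int.floordiv n p * p = n := fdiv_mul n p (by omega) hd
        have hpos : 1 ≤ PySem.Int.floordiv n p := fdiv_pos n p hn (by omega) hd
        have hlt : PySem.Int.floordiv n p < n := by nlinarith
        obtain ⟨j, h1, h2, h3, h4⟩ := ih p (PySem.Int.floordiv n p) (e + 1) (by omega) hp hpos
        refine ⟨j + 1, by push_cast [h1]; ring, ?_, h3, h4⟩
        calc n = p * PySem.Int.floordiv n p := by linarith [hmul, mul_comm (PySem.Int.floordiv n p) p]
        _ = p * (p ^ j * (pvTrial fuel p (PySem.Int.floordiv n p) (e + 1)).1) := by rw [← h2]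
        _ = p ^ (j + 1) * (pvTrial fuel p (PySem.Int.floordiv n p) (e + 1)).1 := by ring
      · rw [if_neg hc]
        have hnd : ¬ p ∣ n := fun hd => hc (by simp [(PySem.Int.mod_eq_zero_iff_dvd n p).mpr hd])
        exact ⟨0, by simp, by simp, hnd, hn⟩

-- a p ≥ 2 dividing n with no smaller divisor of n is prime
lemma prime_of_no_small (p n : Int) (hp : 2 ≤ p) (hd : p ∣ n) (hn : 1 ≤ n)
    (hinv : ∀ q : Int, 2 ≤ q → q < p → ¬ q ∣ n) : p.toNat.Prime := by
  rw [Nat.prime_def_lt']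
  refine ⟨by omega, ?_⟩
  intro m h2m hm hmd
  have hmi : (m : Int) ∣ p := by
    have := Int.natCast_dvd_natCast.mpr hmd
    rwa [Int.toNat_of_nonneg (by omega : (0:Int) ≤ p)] at this
  exact hinv m (by omega) (by omega) (dvd_trans hmi hd)

-- an r ≥ 2 below p² with no divisor in [2, p) is prime
lemma prime_of_sq (r p : Int) (hp : 2 ≤ p) (hr : 2 ≤ r) (hrp : r < p * p)
    (hinv : ∀ q : Int, 2 ≤ q → q < p → ¬ q ∣ r) : r.toNat.Prime := by
  by_contra hnp
  have hfp := Nat.minFac_prime (show r.toNat ≠ 1 by omega)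
  have h2f : 2 ≤ r.toNat.minFac := hfp.two_le
  have hsq : r.toNat.minFac ^ 2 ≤ r.toNat := Nat.minFac_sq_le_self (by omega) hnp
  have hfi : (r.toNat.minFac : Int) ∣ r := by
    have := Int.natCast_dvd_natCast.mpr (Nat.minFac_dvd r.toNat)
    rwa [Int.toNat_of_nonneg (by omega : (0:Int) ≤ r)] at this
  have hsq' : (r.toNat.minFac : Int) * (r.toNat.minFac : Int) ≤ r := by
    have h := hsq
    rw [pow_two] at h
    have h2 : ((r.toNat.minFac * r.toNat.minFac : ℕ) : Int) ≤ ((r.toNat : ℕ) : Int) := by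
      exact_mod_cast h
    push_cast at h2
    rwa [Int.toNat_of_nonneg (by omega : (0:Int) ≤ r)] at h2
  have hflt : (r.toNat.minFac : Int) < p := by
    by_contra hle
    have hpf : p ≤ (r.toNat.minFac : Int) := by omega
    have : p * p ≤ (r.toNat.minFac : Int) * (r.toNat.minFac : Int) :=
      mul_le_mul hpf hpf (by omega) (by omega)
    omega
  exact hinv _ (by exact_mod_cast h2f) hflt hfi

-- full invariant of the outer factorisation loop
lemma pvFactor_exit (fuel : Nat) (n p : Int) (acc : List (Int × Int)) (hg : ¬ p * p ≤ n)
    (hp : 2 ≤ p) (hn : 1 ≤ n) (hinv : ∀ q : Int, 2 ≤ q → q < p → ¬ q ∣ n) :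
    ∃ L, (pvFactor fuel n p acc).1 = acc ++ L ∧
      prodPE L * (pvFactor fuel n p acc).2 = n ∧
      (∀ pe ∈ L, 2 ≤ pe.1 ∧ pe.1.toNat.Prime ∧ 1 ≤ pe.2) ∧
      1 ≤ (pvFactor fuel n p acc).2 ∧
      ((pvFactor fuel n p acc).2 = 1 ∨ (pvFactor fuel n p acc).2.toNat.Prime) := by
  have hval : pvFactor fuel n p acc = (acc, n) := by
    cases fuel with
    | zero => rfl
    | succ fuel => simp only [pvFactor]; rw [if_neg hg]
  rw [hval]
  refine ⟨[], by simp, by simp [prodPE], by simp, hn, ?_⟩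
  by_cases hn1 : n = 1
  · exact Or.inl hn1
  · exact Or.inr (prime_of_sq n p hp (by omega) (by omega) hinv)

lemma pvFactor_spec : ∀ (fuel : Nat) (n p : Int) (acc : List (Int × Int)),
    (n + 2 - p).toNat ≤ fuel → 2 ≤ p → 1 ≤ n → (∀ q : Int, 2 ≤ q → q < p → ¬ q ∣ n) →
    ∃ L, (pvFactor fuel n p acc).1 = acc ++ L ∧
      prodPE L * (pvFactor fuel n p acc).2 = n ∧
      (∀ pe ∈ L, 2 ≤ pe.1 ∧ pe.1.toNat.Prime ∧ 1 ≤ pe.2) ∧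
      1 ≤ (pvFactor fuel n p acc).2 ∧
      ((pvFactor fuel n p acc).2 = 1 ∨ (pvFactor fuel n p acc).2.toNat.Prime) := by
  intro fuel
  induction fuel with
  | zero =>
      intro n p acc h hp hn hinv
      refine pvFactor_exit 0 n p acc (fun hg => ?_) hp hn hinv
      have : p ≤ n := le_trans (by nlinarith) hg
      omega
  | succ fuel ih =>
      intro n p acc h hp hn hinv
      by_cases hg : p * p ≤ n
      · have hpn : p ≤ n := le_trans (by nlinarith) hg
        simp only [pvFactor]
        rw [if_pos hg]
        by_cases hm : PySem.Int.mod n p == 0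
        · rw [if_pos hm]
          have hd : p ∣ n := (PySem.Int.mod_eq_zero_iff_dvd n p).mp (by simpa using hm)
          obtain ⟨j, hj1, hj2, hj3, hj4⟩ := pvTrial_spec n.toNat p n 0 le_rfl hp hn
          have hj1' : (pvTrial n.toNat p n 0).2 = (j : Int) := by omega
          have hjpos : 1 ≤ j := by
            by_contra hj0
            have : j = 0 := by omega
            rw [this] at hj2; simp at hj2
            exact hj3 (hj2 ▸ hd)
          have hfle : (pvTrial n.toNat p n 0).1 ≤ n := by
            have hpow : 1 ≤ p ^ j := one_le_pow₀ (by omega : (1:Int) ≤ p)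
            nlinarith [hj2, hj4]
          have hinv' : ∀ q : Int, 2 ≤ q → q < p + 1 → ¬ q ∣ (pvTrial n.toNat p n 0).1 := by
            intro q h2q hq hqd
            rcases lt_or_ge q p with hqp | hqp
            · exact hinv q h2q hqp (dvd_trans hqd
                ⟨p ^ j, by linarith [hj2, mul_comm ((pvTrial n.toNat p n 0).1) (p ^ j)]⟩)
            · have : q = p := by omega
              exact hj3 (this ▸ hqd)
          obtain ⟨L', hL1, hL2, hL3, hL4, hL5⟩ :=
            ih (pvTrial n.toNat p n 0).1 (p + 1) (acc ++ [(p, (pvTrial n.toNat p n 0).2)])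
              (by omega) (by omega) hj4 hinv'
          refine ⟨(p, (pvTrial n.toNat p n 0).2) :: L', by simpa using hL1, ?_, ?_, hL4, hL5⟩
          · rw [prodPE_cons]
            have : (p, (pvTrial n.toNat p n 0).2).2.toNat = j := by simp [hj1']
            rw [this, mul_assoc, hL2]
            simpa using hj2.symm
          · intro pe hpe
            rcases List.mem_cons.mp hpe with h | h
            · subst h
              exact ⟨hp, prime_of_no_small p n hp hd hn hinv, by omega⟩
            · exact hL3 pe h
        · rw [if_neg hm]
          have hinv' : ∀ q : Int, 2 ≤ q → q < p + 1 → ¬ q ∣ n := by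
            intro q h2q hq hqd
            rcases lt_or_ge q p with hqp | hqp
            · exact hinv q h2q hqp hqd
            · have : q = p := by omega
              subst this
              exact hm (by simp [(PySem.Int.mod_eq_zero_iff_dvd n q).mpr hqd])
          exact ih n (p + 1) acc (by omega) (by omega) hn hinv'
      · exact pvFactor_exit (fuel + 1) n p acc hg hp hn hinv

-- membership in one generation step
lemma mem_pvStep (s : List Int) (pe : Int × Int) (x : Int) :
    x ∈ pvStep s pe ↔ ∃ d ∈ s, ∃ k : Int, 0 ≤ k ∧ k ≤ pe.2 ∧ x = d * pe.1 ^ k.toNat := by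
  simp only [pvStep, PySem.Set.mem_ofList, List.mem_flatMap, List.mem_map,
    PySem.List.mem_pyRange_one]
  constructor
  · rintro ⟨d, hd, k, ⟨hk0, hk1⟩, rfl⟩
    exact ⟨d, hd, k, hk0, by omega, rfl⟩
  · rintro ⟨d, hd, k, hk0, hk1, rfl⟩
    exact ⟨d, hd, k, ⟨hk0, by omega⟩, rfl⟩

-- membership across the whole generation fold
lemma mem_foldl_pvStep : ∀ (L : List (Int × Int)) (s : List Int) (x : Int),
    x ∈ L.foldl pvStep s ↔ ∃ d ∈ s, ∃ w, GenI L w ∧ x = d * w := by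
  intro L
  induction L with
  | nil =>
      intro s x
      simp only [List.foldl_nil, GenI]
      constructor
      · intro hx; exact ⟨x, hx, 1, rfl, by ring⟩
      · rintro ⟨d, hd, w, rfl, rfl⟩; simpa using hd
  | cons pe L ih =>
      intro s x
      rw [List.foldl_cons, ih]
      constructor
      · rintro ⟨d', hd', w', hw', rfl⟩
        obtain ⟨d, hd, k, hk0, hk1, rfl⟩ := (mem_pvStep s pe d').mp hd'
        exact ⟨d, hd, w' * pe.1 ^ k.toNat, ⟨w', k, hw', hk0, hk1, rfl⟩, by ring⟩
      · rintro ⟨d, hd, w, ⟨z, k, hz, hk0, hk1, rfl⟩, rfl⟩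
        exact ⟨d * pe.1 ^ k.toNat, (mem_pvStep s pe _).mpr ⟨d, hd, k, hk0, hk1, rfl⟩, z, hz, by ring⟩

-- generated elements are positive divisors of the factor product
lemma GenI_pos_dvd (L : List (Int × Int)) (hL : ∀ pe ∈ L, 2 ≤ pe.1) :
    ∀ x, GenI L x → 1 ≤ x ∧ x ∣ prodPE L := by
  induction L with
  | nil => intro x hx; rw [show GenI [] x = (x = 1) from rfl] at hx; subst hx; simp [prodPE]
  | cons pe L ih =>
      rintro x ⟨z, k, hz, hk0, hk1, rfl⟩
      have h2 : 2 ≤ pe.1 := hL pe (List.mem_cons_self ..)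
      obtain ⟨hz1, hzd⟩ := ih (fun q hq => hL q (List.mem_cons_of_mem _ hq)) z hz
      have hpow : 1 ≤ pe.1 ^ k.toNat := one_le_pow₀ (by omega)
      refine ⟨by nlinarith, ?_⟩
      rw [prodPE_cons, mul_comm z (pe.1 ^ k.toNat)]
      exact mul_dvd_mul (pow_dvd_pow pe.1 (by omega)) hzd

-- conversely, every positive divisor of a product of prime powers is generated
lemma dvd_GenI (L : List (Int × Int)) (hL : ∀ pe ∈ L, 2 ≤ pe.1 ∧ pe.1.toNat.Prime ∧ 0 ≤ pe.2) :
    ∀ x, 1 ≤ x → x ∣ prodPE L → GenI L x := by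
  induction L with
  | nil =>
      intro x hx hd
      rw [prodPE_nil] at hd
      rw [show GenI [] x = (x = 1) from rfl]
      exact Int.eq_one_of_dvd_one (by omega) hd
  | cons pe L ih =>
      intro x hx hd
      obtain ⟨h2, hprime, he0⟩ := hL pe (List.mem_cons_self ..)
      have hPpos : 1 ≤ prodPE L := prodPE_pos L (fun q hq => (hL q (List.mem_cons_of_mem _ hq)).1)
      rw [prodPE_cons] at hd
      have hdN : x.natAbs ∣ pe.1.natAbs ^ pe.2.toNat * (prodPE L).natAbs := by
        rw [← Int.natAbs_pow, ← Int.natAbs_mul]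
        exact Int.natAbs_dvd_natAbs.mpr hd
      obtain ⟨d1, d2, hd1, hd2, hx12⟩ := exists_dvd_and_dvd_of_dvd_mul hdN
      have hprime' : pe.1.natAbs.Prime := by
        have he : pe.1.toNat = pe.1.natAbs := by omega
        rwa [he] at hprime
      obtain ⟨k, hk, rfl⟩ := (Nat.dvd_prime_pow hprime').mp hd1
      have hd2pos : 1 ≤ d2 := by
        rcases Nat.eq_zero_or_pos d2 with h | h
        · subst h; simp at hx12; omega
        · exact h
      have hgz : GenI L (d2 : Int) := by
        refine ih (fun q hq => hL q (List.mem_cons_of_mem _ hq)) (d2 : Int) (by exact_mod_cast hd2pos) ?_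
        have : (d2 : Int) ∣ ((prodPE L).natAbs : Int) := Int.natCast_dvd_natCast.mpr hd2
        rwa [Int.natAbs_of_nonneg (by omega)] at this
      refine ⟨(d2 : Int), (k : Int), hgz, by omega, by omega, ?_⟩
      have hxcast : x = ((pe.1.natAbs ^ k * d2 : ℕ) : Int) := by
        rw [← hx12, Int.natAbs_of_nonneg (by omega)]
      rw [hxcast]
      push_cast
      rw [abs_of_nonneg (by omega : (0:Int) ≤ pe.1)]
      have hkk : ((k : Int)).toNat = k := by omega
      rw [hkk]
      ring

-- the generation fold preserves distinctness
lemma nodup_foldl_pvStep : ∀ (L : List (Int × Int)) (s : List Int), s.Nodup →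
    (L.foldl pvStep s).Nodup := by
  intro L
  induction L with
  | nil => intro s hs; simpa using hs
  | cons pe L ih =>
      intro s hs
      rw [List.foldl_cons]
      exact ih _ (PySem.Set.nodup_ofList _)

-- pairwise ≥ plus no duplicates gives strict descent
lemma pairwise_lt_of_le_nodup (l : List Int) (h1 : l.Pairwise (fun a b => b ≤ a))
    (h2 : l.Nodup) : l.Pairwise (fun a b => b < a) := by
  have h := List.Pairwise.and h1 h2
  exact h.imp (fun hab => by omega)

-- the factor list of target: product t, entries ≥ 2, prime, nonneg exponents
lemma factors_spec (t : Int) (ht : 1 ≤ t) :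
    prodPE ((pvFactor (t.toNat + 1) t 2 []).1 ++ (if 1 < (pvFactor (t.toNat + 1) t 2 []).2 then [((pvFactor (t.toNat + 1) t 2 []).2, 1)] else [])) = t ∧
    (∀ pe ∈ (pvFactor (t.toNat + 1) t 2 []).1 ++ (if 1 < (pvFactor (t.toNat + 1) t 2 []).2 then [((pvFactor (t.toNat + 1) t 2 []).2, 1)] else []),
      2 ≤ pe.1 ∧ pe.1.toNat.Prime ∧ 0 ≤ pe.2) := by
  obtain ⟨L, hL1, hL2, hL3, hr1, hr2⟩ :=
    pvFactor_spec (t.toNat + 1) t 2 [] (by omega) le_rfl ht (fun q h1 h2 => by omega)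
  rw [show ([] : List (Int × Int)) ++ L = L from rfl] at hL1
  constructor
  · rw [hL1, prodPE_append]
    by_cases h : 1 < (pvFactor (t.toNat + 1) t 2 []).2
    · rw [if_pos h]
      rw [show prodPE [((pvFactor (t.toNat + 1) t 2 []).2, 1)] = (pvFactor (t.toNat + 1) t 2 []).2 by simp [prodPE]]
      exact hL2
    · rw [if_neg h]
      have : (pvFactor (t.toNat + 1) t 2 []).2 = 1 := by omega
      rw [prodPE_nil, mul_one, ← hL2, this, mul_one]
  · intro pe hpe
    rcases List.mem_append.mp hpe with h | h
    · rw [hL1] at h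
      obtain ⟨a, b, c⟩ := hL3 pe h
      exact ⟨a, b, by omega⟩
    · by_cases h1 : 1 < (pvFactor (t.toNat + 1) t 2 []).2
      · rw [if_pos h1, List.mem_singleton] at h
        subst h
        refine ⟨by omega, ?_, by omega⟩
        rcases hr2 with h2 | h2
        · omega
        · exact h2
      · rw [if_neg h1] at h
        simp at h

-- B's output, unfolded for positive target
lemma alt_eq (t m : Int) (ht : 1 ≤ t) :
    get_divigers_alt t m = PySem.List.sorted
      ((((pvFactor (t.toNat + 1) t 2 []).1 ++ (if 1 < (pvFactor (t.toNat + 1) t 2 []).2 then [((pvFactor (t.toNat + 1) t 2 []).2, 1)] else [])).foldl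
          pvStep (PySem.Set.ofList [1])).filter (fun d => decide (d ≤ m)))
      (fun x => x) true := by
  rw [get_divigers_alt, if_neg (by omega : ¬ t ≤ 0)]

-- membership in B's output
lemma alt_mem (t m x : Int) (ht : 1 ≤ t) :
    x ∈ get_divigers_alt t m ↔ 1 ≤ x ∧ x ≤ m ∧ x ∣ t := by
  obtain ⟨hprod, hgood⟩ := factors_spec t ht
  rw [alt_eq t m ht, PySem.List.mem_sorted, List.mem_filter, mem_foldl_pvStep]
  constructor
  · rintro ⟨⟨d, hd, w, hw, rfl⟩, hle⟩
    have hd1 : d = 1 := by simpa [PySem.Set.mem_ofList] using hd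
    subst hd1
    obtain ⟨h1, hdvd⟩ := GenI_pos_dvd _ (fun pe h => (hgood pe h).1) w hw
    rw [one_mul] at hle ⊢
    exact ⟨h1, by simpa using hle, hprod ▸ hdvd⟩
  · rintro ⟨h1, h2, h3⟩
    refine ⟨⟨1, by simp [PySem.Set.mem_ofList], x, ?_, (one_mul x).symm⟩, ?_⟩
    · exact dvd_GenI _ hgood x h1 (by rw [hprod]; exact h3)
    · simpa using h2

-- B's output is strictly descending
lemma alt_desc (t m : Int) (ht : 1 ≤ t) : (get_divigers_alt t m).Pairwise (fun a b => b < a) := by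
  rw [alt_eq t m ht]
  refine pairwise_lt_of_le_nodup _ ?_ ?_
  · exact PySem.List.sorted_pairwise_rev _ _
  · refine (PySem.List.sorted_perm _ _ _).nodup_iff.mpr ?_
    exact List.Nodup.filter _ (nodup_foldl_pvStep _ _ (PySem.Set.nodup_ofList _))

-- ============ assembly ============

lemma a_desc (t m : Int) (ht : 1 ≤ t) :
    (get_divigers t m).Pairwise (fun a b => b < a) ∧
    (∀ x, x ∈ get_divigers t m ↔ 1 ≤ x ∧ x ≤ m ∧ x ∣ t) := by
  obtain ⟨ja, hia, hexa, hinta, hA⟩ := aloopA_spec t m (m + 1 - 1).toNat 1 le_rfl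
  set R := PySem.List.pyRange 1 ja with hR
  set S := R.filter (pSmall t) with hS
  set Bq := (R.filter (pqA t m)).map (fun k => PySem.Int.floordiv t k) with hBq
  -- facts about members of S and Bq
  have hSmem : ∀ x ∈ S, 1 ≤ x ∧ x ≤ m ∧ x ∣ t ∧ x * x ≤ t := by
    intro x hx
    rw [hS, List.mem_filter] at hx
    have h1 := PySem.List.mem_pyRange_one.mp hx.1
    have h2 : PySem.Int.mod t x = 0 := by
      have h3 := hx.2; simp only [pSmall, beq_iff_eq] at h3; exact h3
    have h4 := hinta x h1.1 h1.2
    exact ⟨h1.1, h4.1, (PySem.Int.mod_eq_zero_iff_dvd t x).mp h2, h4.2⟩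
  have hBmem : ∀ y ∈ Bq, 1 ≤ y ∧ y ≤ m ∧ y ∣ t ∧ t < y * y := by
    intro y hy
    rw [hBq, List.mem_map] at hy
    obtain ⟨k, hk, hyk⟩ := hy
    rw [List.mem_filter] at hk
    have h1 := PySem.List.mem_pyRange_one.mp hk.1
    have h3 := hk.2
    simp only [pqA, Bool.and_eq_true, beq_iff_eq, decide_eq_true_eq] at h3
    have hkd : k ∣ t := (PySem.Int.mod_eq_zero_iff_dvd t k).mp h3.1
    have hkk : k * k < t := lt_of_le_of_ne (hinta k h1.1 h1.2).2 h3.2.2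
    have hyd : y ∣ t := ⟨k, by rw [← hyk]; linarith [fdiv_mul t k h1.1 hkd]⟩
    refine ⟨hyk ▸ fdiv_pos t k ht h1.1 hkd, hyk ▸ h3.2.1, hyd,
      hyk ▸ fdiv_sq_gt t k ht h1.1 hkd hkk⟩
  -- backward: every divisor ≤ m appears in S or Bq
  have hlt_ja : ∀ k, 1 ≤ k → k ≤ m → k * k ≤ t → k < ja := by
    intro k h1 h2 h3
    by_contra h
    exact hexa ⟨by omega, by nlinarith⟩
  have hback : ∀ x, 1 ≤ x → x ≤ m → x ∣ t → x ∈ S ∨ x ∈ Bq := by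
    intro x h1 h2 h3
    by_cases hsq : x * x ≤ t
    · left
      rw [hS, List.mem_filter]
      refine ⟨PySem.List.mem_pyRange_one.mpr ⟨h1, hlt_ja x h1 h2 hsq⟩, ?_⟩
      simp [pSmall, (PySem.Int.mod_eq_zero_iff_dvd t x).mpr h3]
    · right
      obtain ⟨k, hk⟩ := h3
      have hk1 : 1 ≤ k := by nlinarith
      have hkx : k < x := by nlinarith
      have hkk : k * k < t := by nlinarith
      have hfk : PySem.Int.floordiv t k = x := by
        rw [PySem.Int.floordiv_eq_iff_of_pos (by omega)]
        constructor <;> nlinarith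
      have hkd : k ∣ t := ⟨x, by linarith [hk]⟩
      rw [hBq, List.mem_map]
      refine ⟨k, ?_, hfk⟩
      rw [List.mem_filter]
      refine ⟨PySem.List.mem_pyRange_one.mpr ⟨hk1, hlt_ja k hk1 (by omega) (by omega)⟩, ?_⟩
      simp only [pqA, Bool.and_eq_true, beq_iff_eq, decide_eq_true_eq]
      exact ⟨(PySem.Int.mod_eq_zero_iff_dvd t k).mpr hkd, by omega, by omega⟩
  -- order facts
  have hpairS : S.Pairwise (· < ·) := (PySem.List.pairwise_lt_pyRange_one 1 ja).filter _
  have hpairB : Bq.Pairwise (fun a b => b < a) := by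
    rw [hBq, List.pairwise_map]
    refine List.Pairwise.imp_of_mem ?_ ((PySem.List.pairwise_lt_pyRange_one 1 ja).filter _)
    intro a b ha hb hab
    rw [List.mem_filter] at ha hb
    have h1 := PySem.List.mem_pyRange_one.mp ha.1
    have hda : a ∣ t := by
      have h3 := ha.2
      simp only [pqA, Bool.and_eq_true, beq_iff_eq, decide_eq_true_eq] at h3
      exact (PySem.Int.mod_eq_zero_iff_dvd t a).mp h3.1
    have hdb : b ∣ t := by
      have h3 := hb.2
      simp only [pqA, Bool.and_eq_true, beq_iff_eq, decide_eq_true_eq] at h3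
      exact (PySem.Int.mod_eq_zero_iff_dvd t b).mp h3.1
    exact fdiv_anti t a b ht h1.1 hda hdb hab
  have hcross : ∀ x ∈ S, ∀ y ∈ Bq, x < y := by
    intro x hx y hy
    obtain ⟨hx1, _, _, hx4⟩ := hSmem x hx
    obtain ⟨hy1, _, _, hy4⟩ := hBmem y hy
    exact lt_of_sq_lt x y t hx1 hy1 hx4 hy4
  have hpair : (S ++ Bq.reverse).Pairwise (fun a b => a < b) := by
    rw [List.pairwise_append]
    refine ⟨hpairS, List.pairwise_reverse.mpr hpairB, ?_⟩
    intro x hx y hy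
    exact hcross x hx y (List.mem_reverse.mp hy)
  have hperm : (S ++ Bq.reverse).Perm (aloopA t m 1 []) := by
    rw [hA]
    exact ((List.Perm.append_left S (List.reverse_perm Bq)).trans
      (flatMap_stepA_perm t m R).symm)
  -- A's result is the descending list Bq ++ S.reverse
  have hAval : get_divigers t m = Bq ++ S.reverse := by
    simp only [get_divigers]
    rw [PySem.List.sorted_eq_of_perm_of_pairwise_lt (aloopA t m 1 []) (S ++ Bq.reverse)
      (fun x => x) hperm hpair]
    simp
  have hLpair : (Bq ++ S.reverse).Pairwise (fun a b => b < a) := by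
    have : Bq ++ S.reverse = (S ++ Bq.reverse).reverse := by simp
    rw [this]
    exact List.pairwise_reverse.mpr hpair
  rw [hAval]
  constructor
  · exact hLpair
  · intro x
    constructor
    · intro hx
      rcases List.mem_append.mp hx with h | h
      · obtain ⟨h1, h2, h3, _⟩ := hBmem x h
        exact ⟨h1, h2, h3⟩
      · obtain ⟨h1, h2, h3, _⟩ := hSmem x (List.mem_reverse.mp h)
        exact ⟨h1, h2, h3⟩
    · rintro ⟨h1, h2, h3⟩
      rcases hback x h1 h2 h3 with h | h
      · exact List.mem_append.mpr (Or.inr (List.mem_reverse.mpr h))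
      · exact List.mem_append.mpr (Or.inl h)

lemma main_equiv (t m : Int) : get_divigers t m = get_divigers_alt t m := by
  by_cases ht : 1 ≤ t
  · obtain ⟨hpA, hmA⟩ := a_desc t m ht
    exact desc_ext _ _ hpA (alt_desc t m ht) (fun x => (hmA x).trans (alt_mem t m x ht).symm)
  · have hA : aloopA t m 1 [] = [] := by
      rw [aloopA, dif_neg]; rintro ⟨h1, h2⟩; omega
    have h1 : get_divigers t m = [] := by
      unfold get_divigers
      rw [hA]
      rfl
    have h2 : get_divigers_alt t m = [] := by
      rw [get_divigers_alt, if_pos (by omega : t ≤ 0)]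
    rw [h1, h2]

-- ===== VERDICT (by name: the statement is the Claim_ definition above) =====
theorem get_divigers_spec : Claim_equal_get_divigers := by
  intro t m _
  exact main_equiv t m
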